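-- pv_equiv track=rewrite | github.com/thedonofbabadou/Programming-Exam | midterm1.py | find_unan_patterns
-- ===== SOURCE A (Python) =====
-- def find_unan_patterns(text):
--     count = 0
--     start = 0
--
--     while True:
--
--         start = text.find("un", start)
--         if start == -1:
--             break
--
--
--         end = text.find("an", start + 2)
--         if end != -1:
--             count += 1
--             start = end + 2
--         else:
--             break
--
--     return count
-- ===== SOURCE B (Python) =====
-- def find_unan_patterns(text):
--     count = 0
--     seeking_an = False
--     i = 0
--     n = len(text)
--     while i + 1 < n:
--         if not seeking_an and text[i] == 'u' and text[i + 1] == 'n':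
--             seeking_an = True
--             i += 2
--         elif seeking_an and text[i] == 'a' and text[i + 1] == 'n':
--             count += 1
--             seeking_an = False
--             i += 2
--         else:
--             i += 1
--     return count
-- ===== Notes on version B (the rewrite author's own statement) =====
-- stated objective: alternative
-- what changed: A's while-loop of repeated text.find jumps (find 'un', then find 'an', restart past the match) is replaced by a single left-to-right two-state scan over the characters that looks at one adjacent pair at a time.
import Mathlib
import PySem

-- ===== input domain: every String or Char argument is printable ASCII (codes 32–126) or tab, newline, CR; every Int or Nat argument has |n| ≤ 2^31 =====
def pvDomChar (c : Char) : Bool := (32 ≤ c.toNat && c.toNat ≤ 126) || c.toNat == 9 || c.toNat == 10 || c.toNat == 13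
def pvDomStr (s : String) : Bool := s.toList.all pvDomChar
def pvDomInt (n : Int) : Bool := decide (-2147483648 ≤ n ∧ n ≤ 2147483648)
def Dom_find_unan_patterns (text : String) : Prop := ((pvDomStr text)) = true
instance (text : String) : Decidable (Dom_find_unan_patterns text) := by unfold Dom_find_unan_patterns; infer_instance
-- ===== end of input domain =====

-- B replaces A's repeated text.find jumps with one left-to-right two-state scan over the characters (alternative decomposition, same O(n) cost).

-- ===== PORT A =====
-- A's while-loop: state (count, start); text.find(sub, start) is Chars.findFrom on the
-- character list.  The loop is run with fuel = length+1, which is proved sufficient below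
-- (each continuing iteration advances start by at least 4); fuel is only a totality guard.
def findUnanLoopA (text : List Char) : Nat → Int → Int → Int
  | 0, count, _ => count
  | fuel + 1, count, start =>
    let start' := PySem.Chars.findFrom text ['u', 'n'] start none
    if start' = -1 then count
    else
      let e := PySem.Chars.findFrom text ['a', 'n'] (start' + 2) none
      if e ≠ -1 then findUnanLoopA text fuel (count + 1) (e + 2)
      else count

def find_unan_patterns (text : String) : Int :=
  findUnanLoopA text.toList (text.toList.length + 1) 0 0

-- ===== PORT B =====
-- B's while-loop: pointer i with two chars in view becomes structural recursion on the list.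
def findUnanScanB : List Char → Bool → Int → Int
  | [], _, count => count
  | [_], _, count => count
  | a :: b :: rest, seeking, count =>
    if seeking = false ∧ a = 'u' ∧ b = 'n' then findUnanScanB rest true count
    else if seeking = true ∧ a = 'a' ∧ b = 'n' then findUnanScanB rest false (count + 1)
    else findUnanScanB (b :: rest) seeking count
termination_by cs _ _ => cs.length

def find_unan_patterns_alt (text : String) : Int :=
  findUnanScanB text.toList false 0

-- ===== PRECONDITION & SPEC =====
def Spec_find_unan_patterns (text : String) (out : Int) : Prop := out = find_unan_patterns_alt text
instance (text : String) (out : Int) : Decidable (Spec_find_unan_patterns text out) := by unfold Spec_find_unan_patterns; infer_instance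

-- ===== CLAIM (what is proved, stated in full; the proofs are below) =====
def Claim_equal_find_unan_patterns : Prop := ∀ (text : String), Dom_find_unan_patterns text → Spec_find_unan_patterns text (find_unan_patterns text)

-- ===== LEMMAS AND PROOFS =====

-- find.go never returns a value below its offset (other than -1).
lemma findGo_lb (sub : List Char) : ∀ (cs : List Char) (k : Nat),
    PySem.Chars.find.go sub cs k = -1 ∨ (k : Int) ≤ PySem.Chars.find.go sub cs k := by
  intro cs
  induction cs with
  | nil =>
    intro k
    simp only [PySem.Chars.find.go]
    split_ifs <;> simp
  | cons h t ih =>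
    intro k
    simp only [PySem.Chars.find.go]
    split_ifs with hp
    · right; simp
    · rcases ih (k + 1) with h1 | h1
      · left; exact h1
      · right; push_cast at h1 ⊢; omega

-- find.go at offset k is find.go at offset 0, shifted (or -1).
lemma findGo_shift (sub : List Char) (cs : List Char) (k : Nat) :
    PySem.Chars.find.go sub cs k =
      if PySem.Chars.find.go sub cs 0 = -1 then -1 else PySem.Chars.find.go sub cs 0 + k := by
  induction cs generalizing k with
  | nil =>
    simp only [PySem.Chars.find.go]
    split_ifs <;> omega
  | cons h t ih =>
    simp only [PySem.Chars.find.go]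
    by_cases hp : sub.isPrefixOf (h :: t) = true
    · simp [hp]
    · simp only [if_neg hp, Nat.zero_add]
      rw [ih (k + 1), ih 1]
      by_cases h0 : PySem.Chars.find.go sub t 0 = -1
      · simp [h0]
      · rcases findGo_lb sub t 0 with hg | hg
        · exact absurd hg h0
        · simp only [if_neg h0]
          split_ifs with h1 <;> push_cast <;> omega

lemma find_nonneg_of_ne (cs sub : List Char) (h : PySem.Chars.find cs sub ≠ -1) :
    0 ≤ PySem.Chars.find cs sub := by
  unfold PySem.Chars.find at *
  rcases findGo_lb sub cs 0 with h1 | h1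
  · exact absurd h1 h
  · simp at h1; exact h1

-- one unfolding step of find on a cons cell.
lemma find_cons (a : Char) (cs sub : List Char) :
    PySem.Chars.find (a :: cs) sub =
      if sub.isPrefixOf (a :: cs) then 0
      else if PySem.Chars.find cs sub = -1 then -1 else PySem.Chars.find cs sub + 1 := by
  unfold PySem.Chars.find
  conv_lhs => rw [PySem.Chars.find.go]
  split_ifs with hp h0
  · simp
  · simp only [Nat.zero_add, findGo_shift sub cs 1, if_pos h0]
  · simp only [Nat.zero_add, findGo_shift sub cs 1, if_neg h0]
    push_cast; ring

lemma isPrefixOf_two (a b : Char) (u v : Char) (cs : List Char) :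
    [u, v].isPrefixOf (a :: b :: cs) = (a = u ∧ b = v : Bool) := by
  by_cases h1 : a = u <;> by_cases h2 : b = v <;> simp [List.isPrefixOf, h1, h2] <;> tauto

lemma isPrefixOf_two_short (u v c : Char) : [u, v].isPrefixOf [c] = false := by
  simp [List.isPrefixOf]

-- B's scan in the "looking for un" state equals: jump to the first "un" and consume it.
lemma scanB_false (n : Nat) : ∀ (cs : List Char), cs.length ≤ n → ∀ (count : Int),
    findUnanScanB cs false count =
      if PySem.Chars.find cs ['u', 'n'] = -1 then count
      else findUnanScanB (cs.drop ((PySem.Chars.find cs ['u', 'n']).toNat + 2)) true count := by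
  induction n with
  | zero =>
    intro cs hcs count
    obtain rfl : cs = [] := List.eq_nil_of_length_eq_zero (Nat.le_zero.mp hcs)
    simp [findUnanScanB, PySem.Chars.find, PySem.Chars.find.go]
  | succ n ih =>
    intro cs hcs count
    match cs with
    | [] => simp [findUnanScanB, PySem.Chars.find, PySem.Chars.find.go]
    | [c] =>
      rw [find_cons]
      simp [findUnanScanB, isPrefixOf_two_short, PySem.Chars.find, PySem.Chars.find.go]
    | a :: b :: rest =>
      rw [find_cons, isPrefixOf_two]
      simp only [decide_eq_true_eq]
      by_cases hab : a = 'u' ∧ b = 'n'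
      · simp [hab, findUnanScanB]
      · rw [if_neg hab, findUnanScanB, if_neg (by tauto), if_neg (by simp)]
        rw [ih (b :: rest) (by simp at hcs ⊢; omega) count]
        by_cases hf : PySem.Chars.find (b :: rest) ['u', 'n'] = -1
        · simp [hf]
        · have h0 := find_nonneg_of_ne _ _ hf
          simp only [if_neg hf]
          rw [if_neg (by omega)]
          have ht : (PySem.Chars.find (b :: rest) ['u', 'n'] + 1).toNat
              = (PySem.Chars.find (b :: rest) ['u', 'n']).toNat + 1 := by omega
          rw [ht]
          rfl

-- B's scan in the "looking for an" state equals: jump to the first "an", consume and count it.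
lemma scanB_true (n : Nat) : ∀ (cs : List Char), cs.length ≤ n → ∀ (count : Int),
    findUnanScanB cs true count =
      if PySem.Chars.find cs ['a', 'n'] = -1 then count
      else findUnanScanB (cs.drop ((PySem.Chars.find cs ['a', 'n']).toNat + 2)) false (count + 1) := by
  induction n with
  | zero =>
    intro cs hcs count
    obtain rfl : cs = [] := List.eq_nil_of_length_eq_zero (Nat.le_zero.mp hcs)
    simp [findUnanScanB, PySem.Chars.find, PySem.Chars.find.go]
  | succ n ih =>
    intro cs hcs count
    match cs with
    | [] => simp [findUnanScanB, PySem.Chars.find, PySem.Chars.find.go]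
    | [c] =>
      rw [find_cons]
      simp [findUnanScanB, isPrefixOf_two_short, PySem.Chars.find, PySem.Chars.find.go]
    | a :: b :: rest =>
      rw [find_cons, isPrefixOf_two]
      simp only [decide_eq_true_eq]
      by_cases hab : a = 'a' ∧ b = 'n'
      · simp [hab, findUnanScanB]
      · rw [if_neg hab, findUnanScanB, if_neg (by simp), if_neg (by tauto)]
        rw [ih (b :: rest) (by simp at hcs ⊢; omega) count]
        by_cases hf : PySem.Chars.find (b :: rest) ['a', 'n'] = -1
        · simp [hf]
        · have h0 := find_nonneg_of_ne _ _ hf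
          simp only [if_neg hf]
          rw [if_neg (by omega)]
          have ht : (PySem.Chars.find (b :: rest) ['a', 'n'] + 1).toNat
              = (PySem.Chars.find (b :: rest) ['a', 'n']).toNat + 1 := by omega
          rw [ht]
          rfl

-- main invariant: A's fuelled find-loop at index k equals B's scan of the suffix from k.
lemma loopA_eq_scanB (text : List Char) : ∀ (fuel k : Nat) (count : Int),
    k ≤ text.length → text.length - k < fuel →
    findUnanLoopA text fuel count k = findUnanScanB (text.drop k) false count := by
  intro fuel
  induction fuel with
  | zero => intro k count hk hf; omega
  | succ fuel ih =>
    intro k count hk hf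
    rw [findUnanLoopA]
    rw [scanB_false (text.drop k).length _ le_rfl]
    simp only [PySem.Chars.findFrom_natCast text ['u', 'n'] k hk]
    by_cases h1 : PySem.Chars.find (text.drop k) ['u', 'n'] = -1
    · simp [h1]
    · have hp0 := find_nonneg_of_ne _ _ h1
      rw [if_neg h1, if_neg (by omega), if_neg h1]
      set p := PySem.Chars.find (List.drop k text) ['u', 'n'] with hpdef
      have hrne : PySem.Chars.findFrom text ['u', 'n'] (↑k) none ≠ -1 := by
        rw [PySem.Chars.findFrom_natCast text ['u', 'n'] k hk, if_neg h1]
        omega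
      have hspec := PySem.Chars.findFrom_natCast_spec text ['u', 'n'] k hk hrne
      rw [PySem.Chars.findFrom_natCast text ['u', 'n'] k hk, if_neg h1] at hspec
      have htn : ((↑k + p : Int)).toNat = k + p.toNat := by omega
      have hlen : 2 ≤ (List.drop (k + p.toNat) text).length := by
        have h2 := List.IsPrefix.length_le hspec.2.1
        rw [htn] at h2
        simpa using h2
      rw [List.length_drop] at hlen
      have hk1 : k + p.toNat + 2 ≤ text.length := by omega
      have hc : (↑k + p + 2 : Int) = ((k + p.toNat + 2 : Nat) : Int) := by push_cast; omega
      rw [hc, PySem.Chars.findFrom_natCast text ['a', 'n'] (k + p.toNat + 2) hk1]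
      have hdd : List.drop (p.toNat + 2) (List.drop k text) = List.drop (k + p.toNat + 2) text := by
        rw [List.drop_drop]
        congr 1
      rw [hdd, scanB_true (List.drop (k + p.toNat + 2) text).length _ le_rfl]
      by_cases h2 : PySem.Chars.find (List.drop (k + p.toNat + 2) text) ['a', 'n'] = -1
      · simp [h2]
      · set q := PySem.Chars.find (List.drop (k + p.toNat + 2) text) ['a', 'n'] with hqdef
        have hq0 : 0 ≤ q := find_nonneg_of_ne _ _ h2
        rw [if_neg h2, if_neg h2, if_pos (by omega : ¬((↑(k + p.toNat + 2) : Int) + q = -1))]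
        have hrne2 : PySem.Chars.findFrom text ['a', 'n'] (↑(k + p.toNat + 2)) none ≠ -1 := by
          rw [PySem.Chars.findFrom_natCast text ['a', 'n'] _ hk1, if_neg h2]
          omega
        have hspec2 := PySem.Chars.findFrom_natCast_spec text ['a', 'n'] (k + p.toNat + 2) hk1 hrne2
        rw [PySem.Chars.findFrom_natCast text ['a', 'n'] _ hk1, if_neg h2] at hspec2
        have htn2 : ((↑(k + p.toNat + 2) + q : Int)).toNat = k + p.toNat + 2 + q.toNat := by omega
        have hlen2 : 2 ≤ (List.drop (k + p.toNat + 2 + q.toNat) text).length := by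
          have h3 := List.IsPrefix.length_le hspec2.2.1
          rw [htn2] at h3
          simpa using h3
        rw [List.length_drop] at hlen2
        have hk2 : k + p.toNat + 2 + q.toNat + 2 ≤ text.length := by omega
        have hc2 : (↑(k + p.toNat + 2) + q + 2 : Int)
            = ((k + p.toNat + 2 + q.toNat + 2 : Nat) : Int) := by push_cast; omega
        rw [hc2, ih (k + p.toNat + 2 + q.toNat + 2) (count + 1) hk2 (by omega)]
        rw [List.drop_drop]
        congr 2

-- ===== VERDICT (by name: the statement is the Claim_ definition above) =====
theorem find_unan_patterns_spec : Claim_equal_find_unan_patterns := by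
  intro text _
  unfold Spec_find_unan_patterns find_unan_patterns find_unan_patterns_alt
  have := loopA_eq_scanB text.toList (text.toList.length + 1) 0 0 (Nat.zero_le _) (by omega)
  simpa using this
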